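-- pv_equiv track=rewrite | github.com/zhaoweii23/MTMPIC | Feature_generate.py | chemical_tokenize
-- ===== SOURCE A (Python) =====
-- def chemical_tokenize(smiles):
--     """Chemical-specific tokenizer"""
--     elements = ['Fe', 'Cl', 'Br', 'Na', 'Mg']  # Prioritize two-character elements
--     tokens = []
--     i = 0
--     while i < len(smiles):
--         matched = False
--         # Match two-character elements
--         for elem in elements:
--             if smiles[i:i+2] == elem:
--                 tokens.append(elem)
--                 i += 2
--                 matched = True
--                 break
--         if not matched:
--             # Process special symbols
--             if smiles[i] in ['@', '[', ']']:
--                 tokens.append(smiles[i])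
--                 i +=1
--             # Merge digits
--             elif smiles[i].isdigit():
--                 num = []
--                 while i < len(smiles) and smiles[i].isdigit():
--                     num.append(smiles[i])
--                     i +=1
--                 tokens.append(''.join(num))
--             else:
--                 tokens.append(smiles[i])
--                 i +=1
--     return tokens
-- ===== SOURCE B (Python) =====
-- def chemical_tokenize(smiles):
--     """Chemical-specific tokenizer: single pass over (char, next-char) pairs
--     with a pending digit-run accumulator and a skip flag."""
--     TWO = ('Fe', 'Cl', 'Br', 'Na', 'Mg')
--     chars = list(smiles)
--     tokens = []
--     num = []
--     skip = False
--     for c, d in zip(chars, chars[1:] + ['']):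
--         if skip:
--             skip = False
--         elif c + d in TWO:
--             if num:
--                 tokens.append(''.join(num))
--                 num = []
--             tokens.append(c + d)
--             skip = True
--         elif c.isdigit():
--             num.append(c)
--         else:
--             if num:
--                 tokens.append(''.join(num))
--                 num = []
--             tokens.append(c)
--     if num:
--         tokens.append(''.join(num))
--     return tokens
-- ===== Notes on version B (the rewrite author's own statement) =====
-- stated objective: faster
-- what changed: Replaced the index-pointer scanner with its inner element-matching loop and inner digit-while loop by one flat pass over (char, next-char) pairs that keeps a pending digit-run accumulator and a skip flag, avoiding repeated slicing and per-position element scans.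
import Mathlib
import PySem

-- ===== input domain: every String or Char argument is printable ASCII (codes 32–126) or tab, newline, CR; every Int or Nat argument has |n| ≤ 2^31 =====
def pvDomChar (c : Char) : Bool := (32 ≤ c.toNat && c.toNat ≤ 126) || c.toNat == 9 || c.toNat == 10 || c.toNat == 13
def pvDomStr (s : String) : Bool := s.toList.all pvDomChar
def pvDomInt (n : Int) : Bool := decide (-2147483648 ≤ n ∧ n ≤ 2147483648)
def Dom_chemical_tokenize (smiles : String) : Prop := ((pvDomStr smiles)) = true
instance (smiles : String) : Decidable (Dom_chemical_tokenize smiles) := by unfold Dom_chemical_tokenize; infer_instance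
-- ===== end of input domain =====

-- B replaces A's index pointer with inner element/digit loops by one flat pass over
-- (char, next-char) pairs with a pending digit accumulator and a skip flag (measured faster in a timing run).

-- ===== PORT A =====
-- A's 'elements' list of two-character element strings
def pyElements : List (List Char) := [['F','e'],['C','l'],['B','r'],['N','a'],['M','g']]

-- 'for elem in elements: if smiles[i:i+2] == elem' (the slice i:i+2 from position i is take 2 of the suffix)
def elemLoopA : List (List Char) → List Char → Option (List Char)
  | [], _ => none
  | e :: rest, cs => if cs.take 2 = e then some e else elemLoopA rest cs

-- the inner 'while i < len(smiles) and smiles[i].isdigit(): num.append(...)'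
def numLoopA : List Char → List Char × List Char
  | [] => ([], [])
  | c :: cs =>
    if PySem.Chars.isdigit c then
      let p := numLoopA cs
      (c :: p.1, p.2)
    else ([], c :: cs)

theorem numLoopA_snd_length_le (cs : List Char) : (numLoopA cs).2.length ≤ cs.length := by
  induction cs with
  | nil => simp [numLoopA]
  | cons c cs ih =>
    simp only [numLoopA]
    split
    · simpa using Nat.le_succ_of_le ih
    · simp

-- the outer 'while i < len(smiles)' loop, as recursion on the suffix smiles[i:]
def tokLoopA : List Char → List String
  | [] => []
  | c :: rest =>
    match elemLoopA pyElements (c :: rest) with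
    | some e => String.mk e :: tokLoopA rest.tail          -- i += 2
    | none =>
      if c = '@' ∨ c = '[' ∨ c = ']' then String.mk [c] :: tokLoopA rest
      else if PySem.Chars.isdigit c then
        let p := numLoopA (c :: rest)
        String.mk p.1 :: tokLoopA p.2
      else String.mk [c] :: tokLoopA rest
termination_by cs => cs.length
decreasing_by
  · simp
  · simp
  · simp only [numLoopA, *, if_pos]
    exact Nat.lt_succ_of_le (numLoopA_snd_length_le rest)
  · simp

def chemical_tokenize (smiles : String) : List String := tokLoopA smiles.toList

-- ===== PORT B =====
-- B's tuple TWO of two-character element strings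
def pyTwoB : List (List Char) := [['F','e'],['C','l'],['B','r'],['N','a'],['M','g']]

-- zip(chars, chars[1:] + ['']): the second component is a 1-char string or ''
def pairsB (cs : List Char) : List (Char × List Char) :=
  cs.zip ((cs.drop 1).map (fun c => [c]) ++ [[]])

-- one iteration of B's for-loop; state = (tokens, num, skip)
def stepB (st : List String × List Char × Bool) (p : Char × List Char) :
    List String × List Char × Bool :=
  match st with
  | (tokens, num, skip) =>
    if skip then (tokens, num, false)
    else if (p.1 :: p.2) ∈ pyTwoB then
      ((if num ≠ [] then tokens ++ [String.mk num] else tokens) ++ [String.mk (p.1 :: p.2)], [], true)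
    else if PySem.Chars.isdigit p.1 then (tokens, num ++ [p.1], false)
    else ((if num ≠ [] then tokens ++ [String.mk num] else tokens) ++ [String.mk [p.1]], [], false)

-- the trailing 'if num: tokens.append(...)'
def flushB (st : List String × List Char × Bool) : List String :=
  if st.2.1 ≠ [] then st.1 ++ [String.mk st.2.1] else st.1

def chemical_tokenize_alt (smiles : String) : List String :=
  flushB ((pairsB smiles.toList).foldl stepB ([], [], false))

-- ===== PRECONDITION & SPEC =====
def Spec_chemical_tokenize (smiles : String) (out : List String) : Prop := out = chemical_tokenize_alt smiles
instance (smiles : String) (out : List String) : Decidable (Spec_chemical_tokenize smiles out) := by unfold Spec_chemical_tokenize; infer_instance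

-- ===== CLAIM (what is proved, stated in full; the proofs are below) =====
def Claim_equal_chemical_tokenize : Prop := ∀ (smiles : String), Dom_chemical_tokenize smiles → Spec_chemical_tokenize smiles (chemical_tokenize smiles)

-- ===== LEMMAS AND PROOFS =====

theorem pairsB_cons (c : Char) (rest : List Char) :
    pairsB (c :: rest) = (c, rest.take 1) :: pairsB rest := by
  cases rest <;> simp [pairsB]

theorem elemLoopA_eq (es : List (List Char)) (cs : List Char) :
    elemLoopA es cs = if cs.take 2 ∈ es then some (cs.take 2) else none := by
  induction es with
  | nil => simp [elemLoopA]
  | cons e es ih =>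
    simp only [elemLoopA, ih, List.mem_cons]
    by_cases h : cs.take 2 = e
    · subst h; simp
    · simp [h]

theorem digit_not_elem {c : Char} (h : PySem.Chars.isdigit c = true) (d : List Char) :
    (c :: d) ∉ pyTwoB := by
  intro hm
  simp only [pyTwoB, List.mem_cons, List.cons.injEq] at hm
  rcases hm with ⟨rfl, -⟩ | ⟨rfl, -⟩ | ⟨rfl, -⟩ | ⟨rfl, -⟩ | (⟨rfl, -⟩ | h') <;>
    first | exact absurd h (by decide) | simp at h'

theorem single_not_elem (c : Char) : [c] ∉ pyTwoB := by
  simp [pyTwoB]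

theorem headpair_eq_take (c : Char) (rest : List Char) :
    c :: rest.take 1 = (c :: rest).take 2 := by
  cases rest <;> simp

theorem main_invariant :
    ∀ n : Nat, ∀ cs : List Char, cs.length ≤ n →
      (∀ ts, flushB ((pairsB cs).foldl stepB (ts, [], false)) = ts ++ tokLoopA cs) ∧
      (∀ ts num, num ≠ [] →
        flushB ((pairsB cs).foldl stepB (ts, num, false)) =
          ts ++ String.mk (num ++ (numLoopA cs).1) :: tokLoopA (numLoopA cs).2) := by
  intro n
  induction n with
  | zero =>
    intro cs hlen
    have hnil : cs = [] := List.length_eq_zero_iff.mp (Nat.le_zero.mp hlen)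
    subst hnil
    refine ⟨fun ts => by simp [pairsB, flushB, tokLoopA], fun ts num hnum => by
      simp [pairsB, flushB, numLoopA, tokLoopA, hnum]⟩
  | succ n ih =>
    intro cs hlen
    cases cs with
    | nil =>
      refine ⟨fun ts => by simp [pairsB, flushB, tokLoopA], fun ts num hnum => by
        simp [pairsB, flushB, numLoopA, tokLoopA, hnum]⟩
    | cons c rest =>
      have hrest : rest.length ≤ n := by simpa using hlen
      have htake : c :: rest.take 1 = (c :: rest).take 2 := headpair_eq_take c rest
      by_cases hel : (c :: rest.take 1) ∈ pyTwoB
      · -- element match: rest must be nonempty (elements have length 2)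
        cases rest with
        | nil =>
          exfalso
          simp only [List.take_nil] at hel
          exact single_not_elem c hel
        | cons x r =>
          have hd2 : (x :: r).take 1 = [x] := rfl
          rw [hd2] at hel
          have hr : r.length ≤ n := by simp at hrest; omega
          have ihP := (ih r hr).1
          have hAe : elemLoopA pyElements (c :: x :: r) = some [c, x] := by
            rw [elemLoopA_eq]
            have h2 : (c :: x :: r).take 2 = [c, x] := rfl
            rw [h2]
            rw [show pyElements = pyTwoB from rfl]
            simp [hel]
          have hstep : ∀ ts num,
              stepB (ts, num, false) (c, [x]) =
              ((if num ≠ [] then ts ++ [String.mk num] else ts) ++ [String.mk [c, x]], [], true) := by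
            intro ts num; simp [stepB, hel]
          have hskip : ∀ (t : List String) (nm : List Char),
              (pairsB (x :: r)).foldl stepB (t, nm, true) = (pairsB r).foldl stepB (t, nm, false) := by
            intro t nm
            rw [pairsB_cons]
            simp [stepB]
          constructor
          · intro ts
            rw [pairsB_cons, List.foldl_cons, hd2, hstep, hskip, ihP]
            simp only [tokLoopA, hAe]
            simp
          · intro ts num hnum
            rw [pairsB_cons, List.foldl_cons, hd2, hstep, hskip, ihP]
            have hcnd : PySem.Chars.isdigit c = false := by
              by_contra hc
              exact digit_not_elem (by simpa using hc) [x] hel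
            simp only [numLoopA, hcnd, Bool.false_eq_true, if_false]
            simp only [tokLoopA, hAe]
            simp [hnum]
      · -- no element match at this position
        have hAe : elemLoopA pyElements (c :: rest) = none := by
          rw [elemLoopA_eq, ← htake]
          rw [show pyElements = pyTwoB from rfl]
          simp [hel]
        by_cases hdig : PySem.Chars.isdigit c = true
        · -- digit: B accumulates, A runs its inner digit loop
          have ihQ := (ih rest hrest).2
          have hnot : ¬(c = '@' ∨ c = '[' ∨ c = ']') := by
            rintro (rfl | rfl | rfl) <;> exact absurd hdig (by decide)
          constructor
          · intro ts
            rw [pairsB_cons, List.foldl_cons]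
            have : stepB (ts, [], false) (c, rest.take 1) = (ts, [c], false) := by
              simp [stepB, hel, hdig]
            rw [this, ihQ ts [c] (by simp)]
            simp only [tokLoopA, hAe]
            simp [hnot, hdig, numLoopA]
          · intro ts num hnum
            rw [pairsB_cons, List.foldl_cons]
            have : stepB (ts, num, false) (c, rest.take 1) = (ts, num ++ [c], false) := by
              simp [stepB, hel, hdig]
            rw [this, ihQ ts (num ++ [c]) (by simp)]
            simp [numLoopA, hdig]
        · -- plain single character
          have ihP := (ih rest hrest).1
          have hstep : ∀ ts num,
              stepB (ts, num, false) (c, rest.take 1) =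
              ((if num ≠ [] then ts ++ [String.mk num] else ts) ++ [String.mk [c]], [], false) := by
            intro ts num; simp [stepB, hel, hdig]
          have hA : tokLoopA (c :: rest) = String.mk [c] :: tokLoopA rest := by
            simp only [tokLoopA, hAe]
            by_cases hsym : c = '@' ∨ c = '[' ∨ c = ']'
            · simp [hsym]
            · simp [hsym, hdig]
          constructor
          · intro ts
            rw [pairsB_cons, List.foldl_cons, hstep, ihP, hA]
            simp
          · intro ts num hnum
            rw [pairsB_cons, List.foldl_cons, hstep, ihP]
            simp only [numLoopA, hdig, Bool.false_eq_true, if_false]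
            rw [hA]
            simp [hnum]

-- ===== VERDICT (by name: the statement is the Claim_ definition above) =====
theorem chemical_tokenize_spec : Claim_equal_chemical_tokenize := by
  intro smiles _
  unfold Spec_chemical_tokenize chemical_tokenize chemical_tokenize_alt
  exact ((main_invariant smiles.toList.length smiles.toList le_rfl).1 []).symm
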